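-- pv_equiv track=rewrite | github.com/doubleobenjamin/agent-zero | python/helpers/prompt_enhancer.py | _analyze_attachment_types
-- ===== SOURCE A (Python) =====
-- from typing import Dict, Any, List, Optional
--
-- def _analyze_attachment_types(attachments: List[str]) -> List[str]:
--     """Analyze attachment types for multi-modal context."""
--     types = []
--     for attachment in attachments:
--         if attachment.lower().endswith(('.png', '.jpg', '.jpeg', '.gif', '.bmp')):
--             types.append('image')
--         elif attachment.lower().endswith(('.mp4', '.avi', '.mov', '.mkv')):
--             types.append('video')
--         elif attachment.lower().endswith(('.mp3', '.wav', '.flac', '.ogg')):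
--             types.append('audio')
--         elif attachment.lower().endswith(('.pdf', '.doc', '.docx', '.txt')):
--             types.append('document')
--         elif attachment.lower().endswith(('.py', '.js', '.html', '.css', '.json')):
--             types.append('code')
--         else:
--             types.append('file')
--     return list(set(types))  # Remove duplicates
-- ===== SOURCE B (Python) =====
-- from typing import List
--
-- _EXT_CATEGORY = {
--     'png': 'image', 'jpg': 'image', 'jpeg': 'image', 'gif': 'image', 'bmp': 'image',
--     'mp4': 'video', 'avi': 'video', 'mov': 'video', 'mkv': 'video',
--     'mp3': 'audio', 'wav': 'audio', 'flac': 'audio', 'ogg': 'audio',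
--     'pdf': 'document', 'doc': 'document', 'docx': 'document', 'txt': 'document',
--     'py': 'code', 'js': 'code', 'html': 'code', 'css': 'code', 'json': 'code',
-- }
--
-- def _analyze_attachment_types(attachments: List[str]) -> List[str]:
--     """Analyze attachment types for multi-modal context (table-lookup version)."""
--     types = [
--         _EXT_CATEGORY.get(ext, 'file') if sep else 'file'
--         for _, sep, ext in (a.lower().rpartition('.') for a in attachments)
--     ]
--     return list(set(types))
-- ===== Notes on version B (the rewrite author's own statement) =====
-- stated objective: idiomatic
-- what changed: Replaces the per-item chain of 22 lowercase+endswith suffix tests with a single last-dot extension split (rpartition) and one dict lookup, building the type list with a comprehension instead of an append loop.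
import Mathlib
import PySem

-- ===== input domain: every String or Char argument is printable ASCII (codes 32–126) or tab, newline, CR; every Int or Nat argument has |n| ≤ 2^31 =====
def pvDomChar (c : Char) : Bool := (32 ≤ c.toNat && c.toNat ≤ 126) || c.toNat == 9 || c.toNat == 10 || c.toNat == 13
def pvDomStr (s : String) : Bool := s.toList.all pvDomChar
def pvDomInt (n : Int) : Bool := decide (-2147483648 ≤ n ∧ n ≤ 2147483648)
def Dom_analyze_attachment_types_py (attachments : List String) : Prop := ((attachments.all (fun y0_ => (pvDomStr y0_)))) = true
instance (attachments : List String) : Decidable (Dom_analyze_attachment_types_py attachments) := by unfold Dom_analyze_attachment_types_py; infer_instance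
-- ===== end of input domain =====

-- B replaces A's chain of lowercase+endswith tests by one last-dot extension split and a
-- table lookup (objective: idiomatic); the returned value is proved identical on all inputs.

-- ===== PORT A =====
-- attachment.lower().endswith((s1, …, sk)): true if any of the suffixes matches
def pvEndsAny (attachment : String) (sufs : List (List Char)) : Bool :=
  sufs.any (fun suf => PySem.Chars.endswith (PySem.Chars.lower attachment.toList) suf)

-- the body of A's loop: the if/elif ladder classifying one attachment
def pvClassifyA (attachment : String) : String :=
  if pvEndsAny attachment [".png".toList, ".jpg".toList, ".jpeg".toList, ".gif".toList, ".bmp".toList] then "image"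
  else if pvEndsAny attachment [".mp4".toList, ".avi".toList, ".mov".toList, ".mkv".toList] then "video"
  else if pvEndsAny attachment [".mp3".toList, ".wav".toList, ".flac".toList, ".ogg".toList] then "audio"
  else if pvEndsAny attachment [".pdf".toList, ".doc".toList, ".docx".toList, ".txt".toList] then "document"
  else if pvEndsAny attachment [".py".toList, ".js".toList, ".html".toList, ".css".toList, ".json".toList] then "code"
  else "file"

def analyze_attachment_types_py (attachments : List String) : List String :=
  let types := attachments.foldl (fun types attachment => types ++ [pvClassifyA attachment]) []
  PySem.Set.ofList types  -- list(set(types)); output is compared as a set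

-- ===== PORT B =====
def pvExtTable : PySem.Dict (List Char) String :=
  PySem.Dict.ofList [("png".toList, "image"), ("jpg".toList, "image"), ("jpeg".toList, "image"), ("gif".toList, "image"), ("bmp".toList, "image"),
   ("mp4".toList, "video"), ("avi".toList, "video"), ("mov".toList, "video"), ("mkv".toList, "video"),
   ("mp3".toList, "audio"), ("wav".toList, "audio"), ("flac".toList, "audio"), ("ogg".toList, "audio"),
   ("pdf".toList, "document"), ("doc".toList, "document"), ("docx".toList, "document"), ("txt".toList, "document"),
   ("py".toList, "code"), ("js".toList, "code"), ("html".toList, "code"), ("css".toList, "code"), ("json".toList, "code")]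

-- one comprehension element: name.rpartition('.') has a separator iff a '.' occurs, and the
-- part after the last '.' is read off the reversed characters (hand port, PySem has no rpartition; exact)
def pvClassifyB (attachment : String) : String :=
  let name := PySem.Chars.lower attachment.toList
  let r := name.reverse
  if r.dropWhile (· ≠ '.') = [] then "file"
  else PySem.Dict.getD pvExtTable (r.takeWhile (· ≠ '.')).reverse "file"

def analyze_attachment_types_py_alt (attachments : List String) : List String :=
  PySem.Set.ofList (attachments.map pvClassifyB)  -- list(set(…)); output is compared as a set

-- ===== PRECONDITION & SPEC =====
def Spec_analyze_attachment_types_py (attachments : List String) (out : List String) : Prop := out = analyze_attachment_types_py_alt attachments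
instance (attachments : List String) (out : List String) : Decidable (Spec_analyze_attachment_types_py attachments out) := by unfold Spec_analyze_attachment_types_py; infer_instance

-- ===== CLAIM (what is proved, stated in full; the proofs are below) =====
def Claim_equal_analyze_attachment_types_py : Prop := ∀ (attachments : List String), Dom_analyze_attachment_types_py attachments → Spec_analyze_attachment_types_py attachments (analyze_attachment_types_py attachments)

-- ===== LEMMAS AND PROOFS =====

-- a suffix '.'++t cannot match a string without a dot
theorem pv_endswith_false_of_no_dot (cs t : List Char) (h : '.' ∉ cs) :
    PySem.Chars.endswith cs ('.' :: t) = false := by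
  rw [Bool.eq_false_iff]
  intro hT
  rcases (PySem.Chars.endswith_iff _ _).mp hT with ⟨pre, hpre⟩
  exact h (hpre ▸ (by simp : '.' ∈ pre ++ '.' :: t))

-- dropWhile p l = c :: _ → the first kept element fails p
theorem pv_dropWhile_cons_head {α : Type} (p : α → Bool) (c : α) (d' : List α) :
    ∀ l : List α, l.dropWhile p = c :: d' → p c = false := by
  intro l
  induction l with
  | nil => intro h; simp [List.dropWhile] at h
  | cons x xs ih =>
    intro h
    rw [List.dropWhile_cons] at h
    by_cases hp : p x
    · exact ih (by simpa [hp] using h)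
    · simp [hp] at h
      rw [h.1] at hp
      simpa using hp

-- two dot-free blocks in front of aligned dots: a prefix relation forces them equal
theorem pv_dotfree_prefix (a : List Char) : ∀ (b p q : List Char), '.' ∉ a → '.' ∉ b →
    (a ++ '.' :: p) <+: (b ++ '.' :: q) → a = b := by
  induction a with
  | nil =>
    intro b p q _ hb hpre
    cases b with
    | nil => rfl
    | cons y b' =>
      rcases hpre with ⟨t, ht⟩
      simp at ht
      exact (hb (by simp [← ht.1])).elim
  | cons x a' ih =>
    intro b p q ha hb hpre
    cases b with
    | nil =>
      rcases hpre with ⟨t, ht⟩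
      simp at ht
      exact (ha (by simp [ht.1])).elim
    | cons y b' =>
      rcases hpre with ⟨t, ht⟩
      simp at ht
      obtain ⟨hxy, hrest⟩ := ht
      have : a' = b' := ih b' p q (fun h => ha (List.mem_cons_of_mem _ h)) (fun h => hb (List.mem_cons_of_mem _ h)) ⟨t, by simpa using hrest⟩
      rw [hxy, this]

-- endswith on a string whose last dot-segment is ext is an equality test on ext
theorem pv_endswith_dot (pre ext t : List Char) (hx : '.' ∉ ext) (ht : '.' ∉ t) :
    PySem.Chars.endswith (pre ++ '.' :: ext) ('.' :: t) = decide (ext = t) := by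
  by_cases h : ext = t
  · subst h
    simp [(PySem.Chars.endswith_iff _ _).mpr ⟨pre, rfl⟩]
  · simp only [decide_eq_false h, Bool.eq_false_iff]
    intro hT
    rcases (PySem.Chars.endswith_iff _ _).mp hT with ⟨u, hu⟩
    have hpre : (t.reverse ++ '.' :: u.reverse) = (ext.reverse ++ '.' :: pre.reverse) := by
      have := congrArg List.reverse hu
      simpa using this
    have := pv_dotfree_prefix t.reverse ext.reverse u.reverse pre.reverse
      (by simpa using ht) (by simpa using hx) (hpre ▸ List.prefix_refl _)
    exact h (by simpa using this.symm)

-- per-element agreement of the two classifiers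
theorem pv_classify_eq (a : String) : pvClassifyA a = pvClassifyB a := by
  unfold pvClassifyA pvClassifyB pvEndsAny
  generalize PySem.Chars.lower a.toList = cs
  dsimp only
  rcases hd : cs.reverse.dropWhile (· ≠ '.') with _ | ⟨c, d'⟩
  · have hno : '.' ∉ cs := by
      intro hm
      have h2 := List.dropWhile_eq_nil_iff.mp hd '.' (List.mem_reverse.mpr hm)
      simp at h2
    rw [show ".png".toList = '.' :: "png".toList from rfl]
    rw [show ".jpg".toList = '.' :: "jpg".toList from rfl]
    rw [show ".jpeg".toList = '.' :: "jpeg".toList from rfl]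
    rw [show ".gif".toList = '.' :: "gif".toList from rfl]
    rw [show ".bmp".toList = '.' :: "bmp".toList from rfl]
    rw [show ".mp4".toList = '.' :: "mp4".toList from rfl]
    rw [show ".avi".toList = '.' :: "avi".toList from rfl]
    rw [show ".mov".toList = '.' :: "mov".toList from rfl]
    rw [show ".mkv".toList = '.' :: "mkv".toList from rfl]
    rw [show ".mp3".toList = '.' :: "mp3".toList from rfl]
    rw [show ".wav".toList = '.' :: "wav".toList from rfl]
    rw [show ".flac".toList = '.' :: "flac".toList from rfl]
    rw [show ".ogg".toList = '.' :: "ogg".toList from rfl]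
    rw [show ".pdf".toList = '.' :: "pdf".toList from rfl]
    rw [show ".doc".toList = '.' :: "doc".toList from rfl]
    rw [show ".docx".toList = '.' :: "docx".toList from rfl]
    rw [show ".txt".toList = '.' :: "txt".toList from rfl]
    rw [show ".py".toList = '.' :: "py".toList from rfl]
    rw [show ".js".toList = '.' :: "js".toList from rfl]
    rw [show ".html".toList = '.' :: "html".toList from rfl]
    rw [show ".css".toList = '.' :: "css".toList from rfl]
    rw [show ".json".toList = '.' :: "json".toList from rfl]
    simp [pv_endswith_false_of_no_dot _ _ hno]
  · have hc : c = '.' := by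
      have := pv_dropWhile_cons_head _ _ _ _ hd
      simpa using this
    subst hc
    have hsplit : cs.reverse.takeWhile (· ≠ '.') ++ ('.' :: d') = cs.reverse := by
      rw [← hd]; exact List.takeWhile_append_dropWhile
    have hcs : cs = d'.reverse ++ '.' :: (cs.reverse.takeWhile (· ≠ '.')).reverse := by
      have := congrArg List.reverse hsplit
      simpa using this.symm
    have hx : '.' ∉ (cs.reverse.takeWhile (· ≠ '.')).reverse := by
      intro hm
      have := List.mem_takeWhile_imp (List.mem_reverse.mp hm)
      simp at this
    set ext := (cs.reverse.takeWhile (· ≠ '.')).reverse with hext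
    simp only [reduceCtorEq, if_false]
    conv_lhs => rw [hcs]
    rw [show ".png".toList = '.' :: "png".toList from rfl]
    rw [show ".jpg".toList = '.' :: "jpg".toList from rfl]
    rw [show ".jpeg".toList = '.' :: "jpeg".toList from rfl]
    rw [show ".gif".toList = '.' :: "gif".toList from rfl]
    rw [show ".bmp".toList = '.' :: "bmp".toList from rfl]
    rw [show ".mp4".toList = '.' :: "mp4".toList from rfl]
    rw [show ".avi".toList = '.' :: "avi".toList from rfl]
    rw [show ".mov".toList = '.' :: "mov".toList from rfl]
    rw [show ".mkv".toList = '.' :: "mkv".toList from rfl]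
    rw [show ".mp3".toList = '.' :: "mp3".toList from rfl]
    rw [show ".wav".toList = '.' :: "wav".toList from rfl]
    rw [show ".flac".toList = '.' :: "flac".toList from rfl]
    rw [show ".ogg".toList = '.' :: "ogg".toList from rfl]
    rw [show ".pdf".toList = '.' :: "pdf".toList from rfl]
    rw [show ".doc".toList = '.' :: "doc".toList from rfl]
    rw [show ".docx".toList = '.' :: "docx".toList from rfl]
    rw [show ".txt".toList = '.' :: "txt".toList from rfl]
    rw [show ".py".toList = '.' :: "py".toList from rfl]
    rw [show ".js".toList = '.' :: "js".toList from rfl]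
    rw [show ".html".toList = '.' :: "html".toList from rfl]
    rw [show ".css".toList = '.' :: "css".toList from rfl]
    rw [show ".json".toList = '.' :: "json".toList from rfl]
    simp only [List.any_cons, List.any_nil, Bool.or_false]
    simp [pv_endswith_dot _ _ _ hx]
    have htab : pvExtTable = PySem.Dict.mk [("png".toList, "image"), ("jpg".toList, "image"), ("jpeg".toList, "image"), ("gif".toList, "image"), ("bmp".toList, "image"), ("mp4".toList, "video"), ("avi".toList, "video"), ("mov".toList, "video"), ("mkv".toList, "video"), ("mp3".toList, "audio"), ("wav".toList, "audio"), ("flac".toList, "audio"), ("ogg".toList, "audio"), ("pdf".toList, "document"), ("doc".toList, "document"), ("docx".toList, "document"), ("txt".toList, "document"), ("py".toList, "code"), ("js".toList, "code"), ("html".toList, "code"), ("css".toList, "code"), ("json".toList, "code")] := by decide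
    rw [htab]
    simp only [PySem.Dict.getD_eq_get?_getD, PySem.Dict.get?_mk_cons]
    by_cases hpng : ext = ['p', 'n', 'g']
    · simp [hpng]
    by_cases hjpg : ext = ['j', 'p', 'g']
    · simp [hjpg]
    by_cases hjpeg : ext = ['j', 'p', 'e', 'g']
    · simp [hjpeg]
    by_cases hgif : ext = ['g', 'i', 'f']
    · simp [hgif]
    by_cases hbmp : ext = ['b', 'm', 'p']
    · simp [hbmp]
    by_cases hmp4 : ext = ['m', 'p', '4']
    · simp [hmp4]
    by_cases havi : ext = ['a', 'v', 'i']
    · simp [havi]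
    by_cases hmov : ext = ['m', 'o', 'v']
    · simp [hmov]
    by_cases hmkv : ext = ['m', 'k', 'v']
    · simp [hmkv]
    by_cases hmp3 : ext = ['m', 'p', '3']
    · simp [hmp3]
    by_cases hwav : ext = ['w', 'a', 'v']
    · simp [hwav]
    by_cases hflac : ext = ['f', 'l', 'a', 'c']
    · simp [hflac]
    by_cases hogg : ext = ['o', 'g', 'g']
    · simp [hogg]
    by_cases hpdf : ext = ['p', 'd', 'f']
    · simp [hpdf]
    by_cases hdoc : ext = ['d', 'o', 'c']
    · simp [hdoc]
    by_cases hdocx : ext = ['d', 'o', 'c', 'x']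
    · simp [hdocx]
    by_cases htxt : ext = ['t', 'x', 't']
    · simp [htxt]
    by_cases hpy : ext = ['p', 'y']
    · simp [hpy]
    by_cases hjs : ext = ['j', 's']
    · simp [hjs]
    by_cases hhtml : ext = ['h', 't', 'm', 'l']
    · simp [hhtml]
    by_cases hcss : ext = ['c', 's', 's']
    · simp [hcss]
    by_cases hjson : ext = ['j', 's', 'o', 'n']
    · simp [hjson]
    simp [hpng, Ne.symm hpng, hjpg, Ne.symm hjpg, hjpeg, Ne.symm hjpeg, hgif, Ne.symm hgif, hbmp, Ne.symm hbmp, hmp4, Ne.symm hmp4, havi, Ne.symm havi, hmov, Ne.symm hmov, hmkv, Ne.symm hmkv, hmp3, Ne.symm hmp3, hwav, Ne.symm hwav, hflac, Ne.symm hflac, hogg, Ne.symm hogg, hpdf, Ne.symm hpdf, hdoc, Ne.symm hdoc, hdocx, Ne.symm hdocx, htxt, Ne.symm htxt, hpy, Ne.symm hpy, hjs, Ne.symm hjs, hhtml, Ne.symm hhtml, hcss, Ne.symm hcss, hjson, Ne.symm hjson, PySem.Dict.get?]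

-- ===== VERDICT (by name: the statement is the Claim_ definition above) =====
theorem analyze_attachment_types_py_spec : Claim_equal_analyze_attachment_types_py := by
  intro attachments _
  unfold Spec_analyze_attachment_types_py analyze_attachment_types_py analyze_attachment_types_py_alt
  rw [PySem.List.foldl_append_singleton_eq_map, funext pv_classify_eq]
  simp
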